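-- pv_equiv track=rewrite | github.com/DarkHoax/UERJ-python | ex10p2.py | Analisa
-- ===== SOURCE A (Python) =====
-- def Analisa(frase):
--     v = b = 0
--     for i in frase:
--         if i == 'a' or i == 'e' or i == 'i' or i == 'o' or i == 'u':
--             v += 1
--         if i == ' ':
--             b += 1
--     return v, b
-- ===== SOURCE B (Python) =====
-- def Analisa(frase):
--     n = len(frase)
--     if n == 0:
--         return 0, 0
--     if n == 1:
--         return (1 if frase in 'aeiou' else 0), (1 if frase == ' ' else 0)
--     m = n // 2
--     v1, b1 = Analisa(frase[:m])
--     v2, b2 = Analisa(frase[m:])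
--     return v1 + v2, b1 + b2
-- ===== Notes on version B (the rewrite author's own statement) =====
-- stated objective: alternative
-- what changed: B counts vowels and spaces by divide and conquer: it splits the string in half, recurses on each half down to single characters (decided by membership in 'aeiou' / equality with ' ') and adds the two pairs, instead of A's fused left-to-right accumulation loop; correct because both counts are additive over concatenation.
import Mathlib
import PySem

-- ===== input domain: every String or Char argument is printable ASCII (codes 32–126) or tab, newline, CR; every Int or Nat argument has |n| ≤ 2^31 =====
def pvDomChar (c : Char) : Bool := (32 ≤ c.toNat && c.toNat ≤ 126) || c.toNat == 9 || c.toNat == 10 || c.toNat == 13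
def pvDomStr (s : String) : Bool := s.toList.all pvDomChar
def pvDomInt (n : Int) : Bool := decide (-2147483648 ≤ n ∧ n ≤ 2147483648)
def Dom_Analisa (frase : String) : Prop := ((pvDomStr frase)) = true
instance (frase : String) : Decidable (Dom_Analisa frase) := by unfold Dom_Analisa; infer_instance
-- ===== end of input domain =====

-- B replaces A's fused left-to-right accumulation loop by divide-and-conquer recursion (alternative decomposition; same result since both counts are additive over concatenation).

-- ===== PORT A =====
def Analisa (frase : String) : Int × Int :=
  frase.toList.foldl
    (fun (vb : Int × Int) (i : Char) =>
      let vb1 := if i == 'a' || i == 'e' || i == 'i' || i == 'o' || i == 'u'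
                 then (vb.1 + 1, vb.2) else vb
      if i == ' ' then (vb1.1, vb1.2 + 1) else vb1)
    (0, 0)

-- ===== PORT B =====
-- divide and conquer on the character list (Source B's string halves frase[:m] / frase[m:] = take/drop)
def AnalisaGo (l : List Char) : Int × Int :=
  if l.length = 0 then (0, 0)
  else if l.length = 1 then
    ((if PySem.Chars.isIn l "aeiou".toList then 1 else 0),
     (if l = [' '] then 1 else 0))
  else
    let m := l.length / 2
    let p1 := AnalisaGo (l.take m)
    let p2 := AnalisaGo (l.drop m)
    (p1.1 + p2.1, p1.2 + p2.2)
termination_by l.length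
decreasing_by
  · simp [List.length_take]; omega
  · simp [List.length_drop]; omega

def Analisa_alt (frase : String) : Int × Int := AnalisaGo frase.toList

-- ===== PRECONDITION & SPEC =====
def Spec_Analisa (frase : String) (out : Int × Int) : Prop := out = Analisa_alt frase
instance (frase : String) (out : Int × Int) : Decidable (Spec_Analisa frase out) := by unfold Spec_Analisa; infer_instance

-- ===== CLAIM (what is proved, stated in full; the proofs are below) =====
def Claim_equal_Analisa : Prop := ∀ (frase : String), Dom_Analisa frase → Spec_Analisa frase (Analisa frase)

-- ===== LEMMAS AND PROOFS =====

def pvVowelP (c : Char) : Bool := c == 'a' || c == 'e' || c == 'i' || c == 'o' || c == 'u'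

theorem analisa_foldl_inv (l : List Char) (v b : Int) :
    l.foldl
      (fun (vb : Int × Int) (i : Char) =>
        let vb1 := if i == 'a' || i == 'e' || i == 'i' || i == 'o' || i == 'u'
                   then (vb.1 + 1, vb.2) else vb
        if i == ' ' then (vb1.1, vb1.2 + 1) else vb1)
      (v, b)
    = (v + (l.countP pvVowelP : Int), b + (l.count ' ' : Int)) := by
  induction l generalizing v b with
  | nil => simp
  | cons x xs ih =>
      rw [List.foldl_cons]
      by_cases hv : (x == 'a' || x == 'e' || x == 'i' || x == 'o' || x == 'u') = true <;>
      by_cases hs : (x == ' ') = true <;>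
      simp only [hv, hs, if_true, if_false, Bool.false_eq_true] <;>
      rw [ih] <;>
      simp [List.count_cons, pvVowelP, hv, hs] <;>
      (try constructor) <;> ring

theorem singleton_isIn_vowels (c : Char) :
    PySem.Chars.isIn [c] "aeiou".toList = pvVowelP c := by
  have hL : "aeiou".toList = ['a', 'e', 'i', 'o', 'u'] := rfl
  rw [hL]
  by_cases h : pvVowelP c = true
  · rw [h]
    simp only [pvVowelP, Bool.or_eq_true, beq_iff_eq] at h
    rcases h with ((((h|h)|h)|h)|h) <;> subst h <;> decide
  · rw [Bool.not_eq_true] at h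
    rw [h]
    rw [PySem.Chars.isIn_eq_false_iff]
    intro hinf
    have hc : c ∈ ['a', 'e', 'i', 'o', 'u'] := hinf.subset (by simp)
    simp only [pvVowelP] at h
    simp only [List.mem_cons, List.not_mem_nil, or_false] at hc
    rcases hc with hc|hc|hc|hc|hc <;> simp [hc] at h

theorem analisaGo_eq (l : List Char) :
    AnalisaGo l = ((l.countP pvVowelP : Int), (l.count ' ' : Int)) := by
  fun_induction AnalisaGo l with
  | case1 l h =>
      rw [List.length_eq_zero_iff] at h; subst h; simp
  | case2 l h0 h1 =>
      rw [List.length_eq_one_iff] at h1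
      obtain ⟨c, rfl⟩ := h1
      rw [singleton_isIn_vowels]
      by_cases hs : c = ' '
      · subst hs; decide
      · by_cases hv : pvVowelP c = true <;>
        simp [List.count, hv, hs]
  | case3 l h0 h1 m p1 p2 ih1 ih2 =>
      simp only [p1, p2, ih1, ih2]
      have h := List.take_append_drop m l
      rw [Prod.mk.injEq]
      constructor
      · rw [← Nat.cast_add, ← List.countP_append, h]
      · rw [← Nat.cast_add, ← List.count_append, h]

-- ===== VERDICT (by name: the statement is the Claim_ definition above) =====
theorem Analisa_spec : Claim_equal_Analisa := by
  intro frase _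
  unfold Spec_Analisa Analisa Analisa_alt
  rw [analisa_foldl_inv, analisaGo_eq]
  simp
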